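-- pv_equiv track=rewrite | github.com/AnthusAI/Plexus | plexus/TranscriptFilter.py | compute_inclusion_flags
-- ===== SOURCE A (Python) =====
-- def compute_inclusion_flags(relevance_flags, prev_count, next_count):
--     include_flags = [False] * len(relevance_flags)
--     for i, is_relevant in enumerate(relevance_flags):
--         if is_relevant:
--             start_index = max(i - prev_count, 0)
--             end_index = min(i + next_count + 1, len(relevance_flags))
--             for j in range(start_index, end_index):
--                 include_flags[j] = True
--     return include_flags
-- ===== SOURCE B (Python) =====
-- def compute_inclusion_flags(relevance_flags, prev_count, next_count):
--     n = len(relevance_flags)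
--     diff = [0] * (n + 1)
--     for i, is_relevant in enumerate(relevance_flags):
--         if is_relevant:
--             start_index = max(i - prev_count, 0)
--             end_index = min(i + next_count + 1, n)
--             if start_index < end_index:
--                 diff[start_index] += 1
--                 diff[end_index] -= 1
--     include_flags = []
--     run = 0
--     for j in range(n):
--         run += diff[j]
--         include_flags.append(run > 0)
--     return include_flags
-- ===== Notes on version B (the rewrite author's own statement) =====
-- stated objective: faster
-- what changed: Replaces A's per-relevant-index inner loop that writes True over each whole window with a difference array (increment at window start, decrement at window end) followed by a single prefix-sum sweep.
import Mathlib
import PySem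

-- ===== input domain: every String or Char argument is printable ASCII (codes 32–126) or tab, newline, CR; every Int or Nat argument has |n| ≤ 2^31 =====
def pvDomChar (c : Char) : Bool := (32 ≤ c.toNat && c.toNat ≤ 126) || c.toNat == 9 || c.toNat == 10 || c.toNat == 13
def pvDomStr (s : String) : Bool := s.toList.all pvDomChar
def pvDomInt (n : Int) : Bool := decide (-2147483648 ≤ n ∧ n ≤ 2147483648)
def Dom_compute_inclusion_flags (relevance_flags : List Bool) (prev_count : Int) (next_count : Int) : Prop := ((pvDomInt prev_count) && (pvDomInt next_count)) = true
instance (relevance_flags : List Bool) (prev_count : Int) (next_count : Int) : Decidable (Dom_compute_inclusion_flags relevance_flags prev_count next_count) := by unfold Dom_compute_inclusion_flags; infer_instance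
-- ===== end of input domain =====

-- B replaces A's per-relevant-index window writes by a difference array with one prefix-sum
-- sweep (objective: faster, O(n + r) instead of O(n·w)).

-- ===== PORT A =====
-- inner loop: for j in range(start_index, end_index): include_flags[j] = True
-- (every j is provably a valid nonnegative index, so plain List.set is exact here)
def pvSetRange (a : List Bool) (s e : Int) : List Bool :=
  (PySem.List.pyRange s e 1).foldl (fun acc j => acc.set j.toNat true) a

-- loop body of A's outer for-loop over enumerate(relevance_flags)
def pvStepA (n : Nat) (prev_count next_count : Int) (a : List Bool) (p : Int × Bool) : List Bool :=
  if p.2 then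
    pvSetRange a (max (p.1 - prev_count) 0) (min (p.1 + next_count + 1) (n : Int))
  else a

def compute_inclusion_flags (relevance_flags : List Bool) (prev_count : Int) (next_count : Int) : List Bool :=
  (PySem.List.enumerate relevance_flags).foldl
    (pvStepA relevance_flags.length prev_count next_count)
    (List.replicate relevance_flags.length false)

-- ===== PORT B =====
-- loop body of B's first loop: two point updates on the difference array
-- (both indices are provably nonnegative and < n+1, so List.set/getD are exact)
def pvStepB (n : Nat) (prev_count next_count : Int) (d : List Int) (p : Int × Bool) : List Int :=
  -- s = max(i - prev_count, 0), e = min(i + next_count + 1, n); d1 = d after "diff[s] += 1"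
  if p.2 then
    if max (p.1 - prev_count) 0 < min (p.1 + next_count + 1) (n : Int) then
      ((d.set (max (p.1 - prev_count) 0).toNat
          (d.getD (max (p.1 - prev_count) 0).toNat 0 + 1)).set
        (min (p.1 + next_count + 1) (n : Int)).toNat
        ((d.set (max (p.1 - prev_count) 0).toNat
            (d.getD (max (p.1 - prev_count) 0).toNat 0 + 1)).getD
          (min (p.1 + next_count + 1) (n : Int)).toNat 0 - 1))
    else d
  else d

-- loop body of B's sweep: run += diff[j]; include_flags.append(run > 0)
def pvSweepStep (diff : List Int) (st : Int × List Bool) (j : Int) : Int × List Bool :=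
  let run := st.1 + PySem.List.pyGetD diff j 0
  (run, st.2 ++ [decide (0 < run)])

def compute_inclusion_flags_alt (relevance_flags : List Bool) (prev_count : Int) (next_count : Int) : List Bool :=
  let n := relevance_flags.length
  let diff := (PySem.List.enumerate relevance_flags).foldl
    (pvStepB n prev_count next_count) (List.replicate (n + 1) (0 : Int))
  ((PySem.List.pyRange 0 (n : Int) 1).foldl (pvSweepStep diff) ((0 : Int), ([] : List Bool))).2

-- ===== PRECONDITION & SPEC =====
def Spec_compute_inclusion_flags (relevance_flags : List Bool) (prev_count : Int) (next_count : Int) (out : List Bool) : Prop := out = compute_inclusion_flags_alt relevance_flags prev_count next_count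
instance (relevance_flags : List Bool) (prev_count : Int) (next_count : Int) (out : List Bool) : Decidable (Spec_compute_inclusion_flags relevance_flags prev_count next_count out) := by unfold Spec_compute_inclusion_flags; infer_instance

-- ===== CLAIM (what is proved, stated in full; the proofs are below) =====
def Claim_equal_compute_inclusion_flags : Prop := ∀ (relevance_flags : List Bool) (prev_count : Int) (next_count : Int), Dom_compute_inclusion_flags relevance_flags prev_count next_count → Spec_compute_inclusion_flags relevance_flags prev_count next_count (compute_inclusion_flags relevance_flags prev_count next_count)

-- ===== LEMMAS AND PROOFS =====

-- "the enumerated pair p covers output position j"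
def pvCov (n : Nat) (prev_count next_count : Int) (p : Int × Bool) (j : Nat) : Bool :=
  p.2 && decide (max (p.1 - prev_count) 0 ≤ (j : Int) ∧ (j : Int) < min (p.1 + next_count + 1) (n : Int))

-- prefix sum of the difference array
def pvS (d : List Int) (m : Nat) : Int := ∑ k ∈ Finset.range m, d.getD k 0

theorem pvGetD_set {α : Type} [Inhabited α] (d : List α) (k : Nat) (v : α) (i : Nat)
    (hk : k < d.length) :
    (d.set k v).getD i default = if k = i then v else d.getD i default := by
  by_cases hi : i < d.length
  · rw [List.getD_eq_getElem _ _ (by simpa using hi), List.getElem_set]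
    rw [List.getD_eq_getElem _ _ hi]
  · rw [List.getD_eq_default _ _ (by simpa using Nat.le_of_not_lt hi),
        List.getD_eq_default _ _ (Nat.le_of_not_lt hi)]
    rw [if_neg (by omega)]

theorem pvFoldSet_length (js : List Int) (a : List Bool) :
    (js.foldl (fun acc j => acc.set j.toNat true) a).length = a.length := by
  induction js generalizing a with
  | nil => rfl
  | cons k js ih => simpa [List.foldl_cons] using ih (a.set k.toNat true)

theorem pvFoldSet_getD (js : List Int) (a : List Bool)
    (hb : ∀ k ∈ js, 0 ≤ k ∧ k < (a.length : Int)) (j : Nat) (hj : j < a.length) :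
    (js.foldl (fun acc j => acc.set j.toNat true) a).getD j false
      = (a.getD j false || js.any (fun k => k == (j : Int))) := by
  induction js generalizing a with
  | nil => simp
  | cons k js ih =>
    obtain ⟨hk0, hkl⟩ := hb k (List.mem_cons_self ..)
    have hlen : (a.set k.toNat true).length = a.length := by simp
    rw [List.foldl_cons, ih (a.set k.toNat true)
        (by intro x hx; rw [hlen]; exact hb x (List.mem_cons_of_mem _ hx))
        (by omega)]
    have : (a.set k.toNat true).getD j false = (a.getD j false || (k == (j : Int))) := by
      rw [show ((a.set k.toNat true).getD j false) = (a.set k.toNat true).getD j default from rfl,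
          pvGetD_set a k.toNat true j (by omega)]
      by_cases h : k = (j : Int)
      · simp [show k.toNat = j by omega, h]
      · simp [show k.toNat ≠ j by omega, h]
    rw [this, List.any_cons, Bool.or_assoc, Bool.or_comm (k == (j:Int))]

theorem pvSetRange_length (a : List Bool) (s e : Int) :
    (pvSetRange a s e).length = a.length := pvFoldSet_length _ _

theorem pvSetRange_getD (a : List Bool) (s e : Int) (hs : 0 ≤ s) (he : e ≤ (a.length : Int))
    (j : Nat) (hj : j < a.length) :
    (pvSetRange a s e).getD j false
      = (a.getD j false || decide (s ≤ (j : Int) ∧ (j : Int) < e)) := by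
  rw [pvSetRange, pvFoldSet_getD _ a
      (by intro k hk; rw [PySem.List.mem_pyRange_one] at hk; omega) j hj]
  congr 1
  rw [Bool.eq_iff_iff]
  simp only [List.any_eq_true, PySem.List.mem_pyRange_one, beq_iff_eq, decide_eq_true_eq]
  constructor
  · rintro ⟨k, ⟨h1, h2⟩, rfl⟩; exact ⟨h1, h2⟩
  · rintro ⟨h1, h2⟩; exact ⟨(j : Int), ⟨h1, h2⟩, rfl⟩

theorem pvFoldA_length (n : Nat) (pc nc : Int) (L : List (Int × Bool)) (a : List Bool) :
    (L.foldl (pvStepA n pc nc) a).length = a.length := by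
  induction L generalizing a with
  | nil => rfl
  | cons p L ih =>
    rw [List.foldl_cons, ih]
    unfold pvStepA
    split
    · exact pvSetRange_length _ _ _
    · rfl

theorem pvFoldA_getD (n : Nat) (pc nc : Int) (L : List (Int × Bool)) (a : List Bool)
    (ha : a.length = n) (j : Nat) (hj : j < n) :
    (L.foldl (pvStepA n pc nc) a).getD j false
      = (a.getD j false || L.any (fun p => pvCov n pc nc p j)) := by
  induction L generalizing a with
  | nil => simp
  | cons p L ih =>
    have hstep : (pvStepA n pc nc a p).length = n := by
      unfold pvStepA; split
      · rw [pvSetRange_length, ha]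
      · exact ha
    rw [List.foldl_cons, ih (pvStepA n pc nc a p) hstep]
    have : (pvStepA n pc nc a p).getD j false = (a.getD j false || pvCov n pc nc p j) := by
      unfold pvStepA pvCov
      by_cases hp : p.2
      · rw [if_pos hp, hp, Bool.true_and,
            pvSetRange_getD a _ _ (le_max_right _ _) (by rw [ha]; exact min_le_right _ _) j
              (by omega)]
      · rw [if_neg hp]
        simp [hp]
    rw [this, List.any_cons, Bool.or_assoc, Bool.or_comm (pvCov n pc nc p j)]

theorem pvGetD_replicate_false (n j : Nat) : (List.replicate n false).getD j false = false := by
  rw [List.getD_eq_getElem?_getD, List.getElem?_replicate]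
  split <;> rfl

-- port A's result, pointwise
theorem pvA_getD (flags : List Bool) (pc nc : Int) (j : Nat) (hj : j < flags.length) :
    (compute_inclusion_flags flags pc nc).getD j false
      = (PySem.List.enumerate flags).any (fun p => pvCov flags.length pc nc p j) := by
  rw [compute_inclusion_flags,
      pvFoldA_getD flags.length pc nc _ _ (List.length_replicate) j hj,
      pvGetD_replicate_false, Bool.false_or]

theorem pvA_length (flags : List Bool) (pc nc : Int) :
    (compute_inclusion_flags flags pc nc).length = flags.length := by
  rw [compute_inclusion_flags, pvFoldA_length, List.length_replicate]

-- B side --------------------------------------------------------------------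

theorem pvS_set (d : List Int) (k : Nat) (c : Int) (m : Nat) (hk : k < d.length) :
    pvS (d.set k (d.getD k 0 + c)) m = pvS d m + (if k < m then c else 0) := by
  unfold pvS
  have : ∀ i, (d.set k (d.getD k 0 + c)).getD i 0
      = d.getD i 0 + (if i = k then c else 0) := by
    intro i
    rw [show ((d.set k (d.getD k 0 + c)).getD i 0)
        = (d.set k (d.getD k 0 + c)).getD i default from rfl, pvGetD_set d k _ i hk]
    by_cases h : k = i
    · subst h; simp [show (d.getD k (0:Int)) = d.getD k default from rfl]
    · simp [h, Ne.symm h]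
  simp only [this]
  rw [Finset.sum_add_distrib, Finset.sum_ite_eq' (Finset.range m) k (fun _ => c)]
  simp [Finset.mem_range]

theorem pvStepB_length (n : Nat) (pc nc : Int) (d : List Int) (p : Int × Bool) :
    (pvStepB n pc nc d p).length = d.length := by
  unfold pvStepB
  split
  · split <;> simp
  · rfl

theorem pvFoldB_S (n : Nat) (pc nc : Int) (L : List (Int × Bool)) (d : List Int)
    (hd : d.length = n + 1) (j : Nat) (hj : j < n) :
    pvS (L.foldl (pvStepB n pc nc) d) (j + 1)
      = pvS d (j + 1) + (L.countP (fun p => pvCov n pc nc p j) : Int) := by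
  induction L generalizing d with
  | nil => simp
  | cons p L ih =>
    have hlen : (pvStepB n pc nc d p).length = n + 1 := by rw [pvStepB_length, hd]
    rw [List.foldl_cons, ih _ hlen]
    have hstep : pvS (pvStepB n pc nc d p) (j + 1)
        = pvS d (j + 1) + (if pvCov n pc nc p j then (1:Int) else 0) := by
      unfold pvStepB pvCov
      by_cases hp : p.2
      · rw [if_pos hp, hp, Bool.true_and]
        set s := max (p.1 - pc) 0 with hs
        set e := min (p.1 + nc + 1) (n : Int) with he
        have hs0 : 0 ≤ s := le_max_right _ _
        have hen : e ≤ (n : Int) := min_le_right _ _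
        by_cases hse : s < e
        · rw [if_pos hse]
          have hsl : s.toNat < d.length := by omega
          have hel : e.toNat < (d.set s.toNat (d.getD s.toNat 0 + 1)).length := by
            rw [List.length_set]; omega
          rw [show ((d.set s.toNat (d.getD s.toNat 0 + 1)).getD e.toNat 0 - 1)
              = ((d.set s.toNat (d.getD s.toNat 0 + 1)).getD e.toNat 0 + (-1)) by ring,
            pvS_set _ _ _ _ hel, pvS_set _ _ _ _ hsl]
          simp only [decide_eq_true_eq]
          split_ifs <;> omega
        · rw [if_neg hse]
          simp only [decide_eq_true_eq]
          split_ifs <;> omega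
      · rw [if_neg hp]
        simp [hp]
    rw [hstep, List.countP_cons]
    push_cast
    by_cases hc : pvCov n pc nc p j <;> simp [hc] <;> ring

theorem pvSweep (diff : List Int) (m : Nat) :
    (PySem.List.pyRange 0 (m : Int) 1).foldl (pvSweepStep diff) ((0 : Int), ([] : List Bool))
      = (pvS diff m, (List.range m).map (fun j => decide (0 < pvS diff (j + 1)))) := by
  induction m with
  | zero => simp [PySem.List.pyRange_one_eq_nil, pvS]
  | succ m ih =>
    rw [show ((m + 1 : Nat) : Int) = (m : Int) + 1 by push_cast; ring,
        PySem.List.pyRange_one_succ_right (by positivity), List.foldl_append, ih]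
    simp only [List.foldl_cons, List.foldl_nil, pvSweepStep, PySem.List.pyGetD_natCast]
    rw [List.range_succ, List.map_append, Prod.mk.injEq]
    constructor
    · rw [pvS, pvS, Finset.sum_range_succ]
    · simp [pvS, Finset.sum_range_succ]

theorem pvB_eq_map (flags : List Bool) (pc nc : Int) :
    compute_inclusion_flags_alt flags pc nc
      = (List.range flags.length).map (fun j =>
          decide (0 < pvS ((PySem.List.enumerate flags).foldl
            (pvStepB flags.length pc nc) (List.replicate (flags.length + 1) 0)) (j + 1))) := by
  rw [compute_inclusion_flags_alt]
  rw [pvSweep]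

theorem pvS_replicate_zero (n m : Nat) : pvS (List.replicate n (0 : Int)) m = 0 := by
  unfold pvS
  refine Finset.sum_eq_zero ?_
  intro k _
  rw [List.getD_eq_getElem?_getD, List.getElem?_replicate]
  split <;> rfl

-- B's result, pointwise: run_j > 0 iff some enumerated pair covers j
theorem pvB_getD (flags : List Bool) (pc nc : Int) (j : Nat) (hj : j < flags.length) :
    (compute_inclusion_flags_alt flags pc nc).getD j false
      = (PySem.List.enumerate flags).any (fun p => pvCov flags.length pc nc p j) := by
  rw [pvB_eq_map,
      List.getD_eq_getElem _ _ (by simpa using hj)]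
  rw [List.getElem_map, List.getElem_range]
  rw [pvFoldB_S flags.length pc nc _ _ (List.length_replicate) j hj, pvS_replicate_zero]
  rw [Bool.eq_iff_iff]
  simp only [zero_add, decide_eq_true_eq, List.any_eq_true]
  rw [show ((0:Int) < ((List.countP (fun p => pvCov flags.length pc nc p j)
      (PySem.List.enumerate flags)) : Int)) ↔
      0 < List.countP (fun p => pvCov flags.length pc nc p j) (PySem.List.enumerate flags)
    from by exact_mod_cast Iff.rfl]
  rw [List.countP_pos_iff]

theorem pvB_length (flags : List Bool) (pc nc : Int) :
    (compute_inclusion_flags_alt flags pc nc).length = flags.length := by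
  rw [pvB_eq_map, List.length_map, List.length_range]

-- ===== VERDICT (by name: the statement is the Claim_ definition above) =====
theorem compute_inclusion_flags_spec : Claim_equal_compute_inclusion_flags := by
  intro flags pc nc _
  unfold Spec_compute_inclusion_flags
  apply List.ext_getElem
  · rw [pvA_length, pvB_length]
  · intro j h1 h2
    have hj : j < flags.length := by rw [pvA_length] at h1; exact h1
    have := (pvA_getD flags pc nc j hj).trans (pvB_getD flags pc nc j hj).symm
    rwa [List.getD_eq_getElem _ _ h1, List.getD_eq_getElem _ _ h2] at this
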